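-- pv_equiv track=rewrite | github.com/viennguyentri747/LocalTools | unit_tests/acu_log_tests/periodic_log_helper.py | find_header_and_rows
-- ===== SOURCE A (Python) =====
-- from typing import List, Tuple, Optional, Dict, Any
--
-- def find_header_and_rows(text: str) -> Tuple[Optional[List[str]], List[List[str]]]:
--     """
--     Finds the tab-delimited header line starting with 'Time' and returns:
--       (header_columns, rows_as_list_of_lists)
--     """
--     header: Optional[List[str]] = None
--     rows: List[List[str]] = []
--
--     lines = text.splitlines()
--     for i, raw in enumerate(lines):
--         line = raw.strip('\n')
--         if line.startswith("Time\t"):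
--             header = line.split('\t')
--             # The remaining lines until EOF that have tab separators are rows
--             for data_line in lines[i+1:]:
--                 if '\t' in data_line:
--                     rows.append(data_line.rstrip('\n').split('\t'))
--             break
--     return header, rows
-- ===== SOURCE B (Python) =====
-- def find_header_and_rows(text):
--     header = None
--     rows = []
--     for raw in text.splitlines():
--         if header is None:
--             line = raw.strip('\n')
--             if line.startswith("Time\t"):
--                 header = line.split('\t')
--         elif '\t' in raw:
--             rows.append(raw.rstrip('\n').split('\t'))
--     return header, rows
-- ===== Notes on version B (the rewrite author's own statement) =====
-- stated objective: simpler
-- what changed: Replaces the outer scan-then-break with a nested slice loop by one stateful pass over the lines: a header-is-None flag switches the single loop from header search to row collection, so no enumerate, no slicing and no break are needed.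
import Mathlib
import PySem

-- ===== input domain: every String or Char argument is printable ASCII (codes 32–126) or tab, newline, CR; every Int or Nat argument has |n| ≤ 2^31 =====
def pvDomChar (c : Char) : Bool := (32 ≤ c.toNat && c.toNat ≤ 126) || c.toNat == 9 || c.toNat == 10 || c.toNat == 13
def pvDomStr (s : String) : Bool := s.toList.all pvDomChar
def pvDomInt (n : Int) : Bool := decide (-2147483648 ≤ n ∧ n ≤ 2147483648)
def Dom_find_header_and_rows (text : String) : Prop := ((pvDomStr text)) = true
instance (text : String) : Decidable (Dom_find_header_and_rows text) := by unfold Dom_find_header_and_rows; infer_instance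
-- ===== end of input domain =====

-- B merges A's scan-then-break outer loop and its inner slice loop into one stateful pass over the lines (same values, different decomposition).


-- hand port of s.rstrip('\n') (PySem has no rstrip-with-chars); exact: drops exactly the trailing '\n' characters
def pvRstripNl (s : String) : String := String.ofList ((s.toList.reverse.dropWhile (· == '\n')).reverse)

-- ===== PORT A =====
-- inner loop: 'for data_line in lines[i+1:]: if '\t' in data_line: rows.append(...)', rows = [] at the break point
-- split('\t') has a nonempty separator, so split? is always some; .getD [] is exact
def pvInnerA (lines : List String) : List (List String) :=
  lines.foldl (fun rows dl =>
    if PySem.Str.isIn "\t" dl then rows ++ [(PySem.Str.split? (pvRstripNl dl) "\t").getD []]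
    else rows) []

-- outer 'for i, raw in enumerate(lines)' with break: structural recursion; the rest list IS lines[i+1:]
def pvOuterA : List String → Option (List String) × List (List String)
  | [] => (none, [])
  | raw :: rest =>
    let line := PySem.Str.stripChars raw "\n"
    if PySem.Str.startswith line "Time\t" then
      (some ((PySem.Str.split? line "\t").getD []), pvInnerA rest)
    else pvOuterA rest

def find_header_and_rows (text : String) : Option (List String) × List (List String) :=
  pvOuterA (PySem.Str.splitlines text)

-- ===== PORT B =====
-- one pass: header-is-None flag selects the branch
def pvStepB (st : Option (List String) × List (List String)) (raw : String) :
    Option (List String) × List (List String) :=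
  match st.1 with
  | none =>
    let line := PySem.Str.stripChars raw "\n"
    if PySem.Str.startswith line "Time\t" then
      (some ((PySem.Str.split? line "\t").getD []), st.2)
    else st
  | some _ =>
    if PySem.Str.isIn "\t" raw then (st.1, st.2 ++ [(PySem.Str.split? (pvRstripNl raw) "\t").getD []])
    else st

def find_header_and_rows_alt (text : String) : Option (List String) × List (List String) :=
  (PySem.Str.splitlines text).foldl pvStepB (none, [])

-- ===== PRECONDITION & SPEC =====
def Spec_find_header_and_rows (text : String) (out : Option (List String) × List (List String)) : Prop := out = find_header_and_rows_alt text
instance (text : String) (out : Option (List String) × List (List String)) : Decidable (Spec_find_header_and_rows text out) := by unfold Spec_find_header_and_rows; infer_instance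

-- ===== CLAIM (what is proved, stated in full; the proofs are below) =====
def Claim_equal_find_header_and_rows : Prop := ∀ (text : String), Dom_find_header_and_rows text → Spec_find_header_and_rows text (find_header_and_rows text)

-- ===== LEMMAS AND PROOFS =====
-- once the header is set, B's fold only appends rows, exactly A's inner loop
theorem pvFoldB_some (lines : List String) (h : List String) (rows : List (List String)) :
    lines.foldl pvStepB (some h, rows) =
      (some h, rows ++ (lines.filter (fun dl => PySem.Str.isIn "\t" dl)).map
        (fun dl => (PySem.Str.split? (pvRstripNl dl) "\t").getD [])) := by
  induction lines generalizing rows with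
  | nil => simp
  | cons l ls ih =>
    simp only [List.foldl_cons, pvStepB, List.filter_cons]
    by_cases hl : PySem.Str.isIn "\t" l = true
    · rw [if_pos hl, if_pos hl, ih]; simp
    · rw [if_neg hl, if_neg (by simpa using hl), ih]

theorem pvOuterA_eq_foldB (lines : List String) :
    pvOuterA lines = lines.foldl pvStepB (none, []) := by
  induction lines with
  | nil => rfl
  | cons raw rest ih =>
    simp only [pvOuterA, List.foldl_cons, pvStepB]
    by_cases hs : PySem.Str.startswith (PySem.Str.stripChars raw "\n") "Time\t" = true
    · rw [if_pos hs, if_pos hs, pvFoldB_some]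
      simp only [pvInnerA]
      rw [PySem.List.foldl_append_if]
    · rw [if_neg hs, if_neg hs, ih]

-- ===== VERDICT (by name: the statement is the Claim_ definition above) =====
theorem find_header_and_rows_spec : Claim_equal_find_header_and_rows := by
  intro text _
  unfold Spec_find_header_and_rows find_header_and_rows find_header_and_rows_alt
  exact pvOuterA_eq_foldB _
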